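-- pv_equiv track=rewrite | github.com/AllisonMatos/allma-enum | plugins/extractors/js.py | categorize_js
-- ===== SOURCE A (Python) =====
-- def categorize_js(js_path: str) -> str:
--     """
--     Categoriza o tipo de arquivo JS baseado no nome/path.
--     """
--     path_lower = js_path.lower()
--
--     if any(x in path_lower for x in ['chunk', 'bundle', 'webpack']):
--         return 'bundle'
--     elif any(x in path_lower for x in ['vendor', 'lib', 'node_modules']):
--         return 'vendor'
--     elif any(x in path_lower for x in ['min.js', '.min.']):
--         return 'minified'
--     elif any(x in path_lower for x in ['main', 'app', 'index']):
--         return 'main'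
--     elif any(x in path_lower for x in ['config', 'settings', 'env']):
--         return 'config'
--     elif '.map' in path_lower:
--         return 'sourcemap'
--     else:
--         return 'other'
-- ===== SOURCE B (Python) =====
-- # Priority map: each keyword -> priority of its category; pick the minimum priority among all matching keywords.
-- KEYWORD_PRIORITY = {
--     'chunk': 0, 'bundle': 0, 'webpack': 0,
--     'vendor': 1, 'lib': 1, 'node_modules': 1,
--     'min.js': 2, '.min.': 2,
--     'main': 3, 'app': 3, 'index': 3,
--     'config': 4, 'settings': 4, 'env': 4,
--     '.map': 5,
-- }
-- CATEGORIES = ['bundle', 'vendor', 'minified', 'main', 'config', 'sourcemap']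
--
--
-- def categorize_js(js_path: str) -> str:
--     path_lower = js_path.lower()
--     best = 6
--     for kw, prio in KEYWORD_PRIORITY.items():
--         if kw in path_lower:
--             best = min(best, prio)
--     return CATEGORIES[best] if best < 6 else 'other'
-- ===== Notes on version B (the rewrite author's own statement) =====
-- stated objective: alternative
-- what changed: Instead of an ordered short-circuiting if/elif chain, B scans a flat keyword->priority map once, accumulates the minimum priority among all matching keywords, and indexes a category table with it.
import Mathlib
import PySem

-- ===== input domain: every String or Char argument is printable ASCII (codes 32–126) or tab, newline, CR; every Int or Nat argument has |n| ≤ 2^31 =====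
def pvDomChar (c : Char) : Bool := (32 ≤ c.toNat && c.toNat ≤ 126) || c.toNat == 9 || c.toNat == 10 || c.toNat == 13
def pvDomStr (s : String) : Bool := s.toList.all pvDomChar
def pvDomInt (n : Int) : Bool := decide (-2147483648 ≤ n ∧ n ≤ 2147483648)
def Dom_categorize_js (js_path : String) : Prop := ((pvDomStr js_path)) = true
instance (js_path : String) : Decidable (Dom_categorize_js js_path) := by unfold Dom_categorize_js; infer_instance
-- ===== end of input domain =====

-- B replaces A's short-circuiting if/elif chain by a min-priority scan over a flat keyword->priority map plus a category table (alternative algorithm, same cost).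


-- ===== PORT A =====
def categorize_js (js_path : String) : String :=
  let path_lower := PySem.Str.lower js_path
  if (["chunk", "bundle", "webpack"].any (fun x => PySem.Str.isIn x path_lower)) then "bundle"
  else if (["vendor", "lib", "node_modules"].any (fun x => PySem.Str.isIn x path_lower)) then "vendor"
  else if (["min.js", ".min."].any (fun x => PySem.Str.isIn x path_lower)) then "minified"
  else if (["main", "app", "index"].any (fun x => PySem.Str.isIn x path_lower)) then "main"
  else if (["config", "settings", "env"].any (fun x => PySem.Str.isIn x path_lower)) then "config"
  else if PySem.Str.isIn ".map" path_lower then "sourcemap"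
  else "other"

-- ===== PORT B =====
-- KEYWORD_PRIORITY as an association list in insertion order
def jsKeywordPriority : List (String × Nat) :=
  [("chunk", 0), ("bundle", 0), ("webpack", 0),
   ("vendor", 1), ("lib", 1), ("node_modules", 1),
   ("min.js", 2), (".min.", 2),
   ("main", 3), ("app", 3), ("index", 3),
   ("config", 4), ("settings", 4), ("env", 4),
   (".map", 5)]

def jsCategories : List String := ["bundle", "vendor", "minified", "main", "config", "sourcemap"]

def categorize_js_alt (js_path : String) : String :=
  let path_lower := PySem.Str.lower js_path
  let best := jsKeywordPriority.foldl
    (fun best e => if PySem.Str.isIn e.1 path_lower then min best e.2 else best) 6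
  if best < 6 then jsCategories.getD best "other" else "other"

-- ===== PRECONDITION & SPEC =====
def Spec_categorize_js (js_path : String) (out : String) : Prop := out = categorize_js_alt js_path
instance (js_path : String) (out : String) : Decidable (Spec_categorize_js js_path out) := by unfold Spec_categorize_js; infer_instance

-- ===== CLAIM (what is proved, stated in full; the proofs are below) =====
def Claim_equal_categorize_js : Prop := ∀ (js_path : String), Dom_categorize_js js_path → Spec_categorize_js js_path (categorize_js js_path)

-- ===== LEMMAS AND PROOFS =====

-- folding the min-priority step over a block of keywords that share one priority
-- equals a single 'any'-guarded min update
theorem jsFoldGroup (L : String) (pr : Nat) (kws : List String) (acc : Nat) :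
    (kws.map (fun k => (k, pr))).foldl
      (fun best e => if PySem.Str.isIn e.1 L then min best e.2 else best) acc
      = if kws.any (fun x => PySem.Str.isIn x L) then min acc pr else acc := by
  induction kws generalizing acc with
  | nil => simp
  | cons k rest ih =>
    simp only [List.map, List.foldl, List.any_cons]
    by_cases hb : PySem.Str.isIn k L = true
    · simp only [hb, Bool.true_or, reduceIte, ih]
      by_cases ha : (rest.any fun x => PySem.Str.isIn x L) = true
      · simp only [ha, reduceIte, min_assoc, min_self]
      · rw [Bool.not_eq_true] at ha
        simp only [ha, Bool.false_eq_true, if_false]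
    · rw [Bool.not_eq_true] at hb
      simp only [hb, Bool.false_eq_true, if_false, Bool.false_or, ih]

-- ===== VERDICT (by name: the statement is the Claim_ definition above) =====
theorem categorize_js_spec : Claim_equal_categorize_js := by
  intro js_path _
  show categorize_js js_path = categorize_js_alt js_path
  simp only [categorize_js, categorize_js_alt]
  have hsplit : jsKeywordPriority
      = (["chunk", "bundle", "webpack"].map (fun k => (k, 0)))
      ++ (["vendor", "lib", "node_modules"].map (fun k => (k, 1)))
      ++ (["min.js", ".min."].map (fun k => (k, 2)))
      ++ (["main", "app", "index"].map (fun k => (k, 3)))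
      ++ (["config", "settings", "env"].map (fun k => (k, 4)))
      ++ ([".map"].map (fun k => (k, 5))) := rfl
  rw [hsplit, List.foldl_append, List.foldl_append, List.foldl_append,
      List.foldl_append, List.foldl_append,
      jsFoldGroup, jsFoldGroup, jsFoldGroup, jsFoldGroup, jsFoldGroup, jsFoldGroup]
  simp only [List.any_cons, List.any_nil, Bool.or_false]
  generalize PySem.Str.isIn "chunk" (PySem.Str.lower js_path) = b1
  generalize PySem.Str.isIn "bundle" (PySem.Str.lower js_path) = b2
  generalize PySem.Str.isIn "webpack" (PySem.Str.lower js_path) = b3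
  generalize PySem.Str.isIn "vendor" (PySem.Str.lower js_path) = b4
  generalize PySem.Str.isIn "lib" (PySem.Str.lower js_path) = b5
  generalize PySem.Str.isIn "node_modules" (PySem.Str.lower js_path) = b6
  generalize PySem.Str.isIn "min.js" (PySem.Str.lower js_path) = b7
  generalize PySem.Str.isIn ".min." (PySem.Str.lower js_path) = b8
  generalize PySem.Str.isIn "main" (PySem.Str.lower js_path) = b9
  generalize PySem.Str.isIn "app" (PySem.Str.lower js_path) = b10
  generalize PySem.Str.isIn "index" (PySem.Str.lower js_path) = b11
  generalize PySem.Str.isIn "config" (PySem.Str.lower js_path) = b12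
  generalize PySem.Str.isIn "settings" (PySem.Str.lower js_path) = b13
  generalize PySem.Str.isIn "env" (PySem.Str.lower js_path) = b14
  generalize PySem.Str.isIn ".map" (PySem.Str.lower js_path) = b15
  cases b1 <;> cases b2 <;> cases b3 <;> cases b4 <;> cases b5 <;> cases b6
    <;> simp [jsCategories] <;> cases b7 <;> cases b8 <;> cases b9 <;> cases b10 <;> cases b11
    <;> simp [jsCategories] <;> cases b12 <;> cases b13 <;> cases b14 <;> cases b15
    <;> simp [jsCategories]
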